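-- pv_equiv track=rewrite | github.com/TarekHub/FSP_TP_AI | Main.py | cout_Max
-- ===== SOURCE A (Python) =====
-- def cout_Max(sol):
--     n = len(sol)
--     m = len(sol[0])
--     cout_list = [[0 for i in range(m)] for j in range(n)]
--
--     for i in range(n):
--         for j in range(m):
--             if i > 0:
--                 if j > 0:
--                     # 2 contraintes de pour éxécuter une tache :
--                     # - La tache precedente (i-1) est achevée dans la  machine j ou je suis
--                     # - La tache i est achevée dans la machine j-1
--                     cout_list[i][j] = sol[i][j] + max(cout_list[i][j - 1], cout_list[i - 1][j])
--                 else: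
--                     cout_list[i][j] = sol[i][j] + cout_list[i - 1][j]
--             # 1ere itération
--             else:
--                 if j > 0:
--                     cout_list[i][j] = sol[i][j] + cout_list[i][j - 1]
--                 else:
--                     cout_list[i][j] = sol[i][j] + cout_list[i][j]
--
--     return cout_list[n - 1][m - 1], cout_list
-- ===== SOURCE B (Python) =====
-- def cout_Max(sol):
--     # Per row i>0 the completion times satisfy the algebraic identity
--     #   C[i][j] = S[j] + max_{k<=j} (C[i-1][k] - S[k-1]),   S = prefix sums of sol[i],
--     # so each row is computed from prefix sums and one running maximum; no cell
--     # of the current row is ever read while building it.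
--     m = len(sol[0])
--     rows = []
--     prev = None
--     for row in sol:
--         s = []
--         t = 0
--         for j in range(m):
--             t += row[j]
--             s.append(t)
--         if prev is None:
--             cur = s
--         else:
--             best = prev[0]
--             cur = [s[0] + best]
--             for j in range(1, m):
--                 best = max(best, prev[j] - s[j - 1])
--                 cur.append(s[j] + best)
--         rows.append(cur)
--         prev = cur
--     return rows[-1][-1], rows
-- ===== Notes on version B (the rewrite author's own statement) =====
-- stated objective: alternative
-- what changed: Replaces the cell recurrence C[i][j]=sol[i][j]+max(C[i][j-1],C[i-1][j]) by the algebraic identity C[i][j]=S[j]+max_{k<=j}(C[i-1][k]-S[k-1]) with S the prefix sums of row i, so each row is computed from prefix sums and a single running maximum over the previous row, never reading the row being built.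
-- outside the precondition, e.g. on cout_Max([]): A raises IndexError, B raises IndexError; on cout_Max([[1, 2], [3]]): A raises IndexError, B raises IndexError
import Mathlib
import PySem

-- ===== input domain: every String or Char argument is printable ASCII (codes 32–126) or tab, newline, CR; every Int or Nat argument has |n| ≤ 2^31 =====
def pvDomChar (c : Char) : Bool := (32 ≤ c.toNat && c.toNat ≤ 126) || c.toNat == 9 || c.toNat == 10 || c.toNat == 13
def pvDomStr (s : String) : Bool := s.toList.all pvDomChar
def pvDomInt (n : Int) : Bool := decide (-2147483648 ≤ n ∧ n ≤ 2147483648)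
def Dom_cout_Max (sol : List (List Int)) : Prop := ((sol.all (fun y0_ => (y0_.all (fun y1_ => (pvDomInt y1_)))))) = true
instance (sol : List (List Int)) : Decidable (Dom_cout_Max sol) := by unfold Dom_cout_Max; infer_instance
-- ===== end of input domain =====

-- B replaces A's cell recurrence C[i][j] = sol[i][j] + max(C[i][j-1], C[i-1][j]) by the
-- identity C[i][j] = S[j] + max_{k≤j}(C[i-1][k] - S[k-1]) (S = prefix sums of row i),
-- computed with one running maximum per row; an alternative of the same cost.

-- ===== PORT A =====
-- reads/writes of the 2D list; in-range on every admitted input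
def pvGet2 (t : List (List Int)) (i j : Nat) : Int := (t.getD i []).getD j 0
def pvSet2 (t : List (List Int)) (i j : Nat) (v : Int) : List (List Int) :=
  t.set i ((t.getD i []).set j v)

-- the body of A's inner loop (the four branches, in A's order)
def pvInner (sol : List (List Int)) (i : Nat) (t : List (List Int)) (j : Nat) : List (List Int) :=
  let s := (sol.getD i []).getD j 0
  let v :=
    if i > 0 then
      if j > 0 then s + max (pvGet2 t i (j - 1)) (pvGet2 t (i - 1) j)
      else s + pvGet2 t (i - 1) j
    else
      if j > 0 then s + pvGet2 t i (j - 1)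
      else s + pvGet2 t i j
  pvSet2 t i j v

def cout_Max (sol : List (List Int)) : Int × List (List Int) :=
  let n := sol.length
  let m := (sol.headD []).length
  let init := (List.range n).map (fun _ => (List.range m).map (fun _ => (0 : Int)))
  let table := (List.range n).foldl (fun t i => (List.range m).foldl (pvInner sol i) t) init
  (pvGet2 table (n - 1) (m - 1), table)

-- ===== PORT B =====
-- prefix sums of the first m entries of a row (Source B's first inner loop)
def pvPrefixM (row : List Int) (m : Nat) : List Int :=
  ((List.range m).foldl
    (fun (st : List Int × Int) j => (st.1 ++ [st.2 + row.getD j 0], st.2 + row.getD j 0))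
    ([], 0)).1

-- a later row from the previous row and its prefix sums, via a running maximum
-- (Source B's second inner loop; state = (best, cur))
def pvRowB (m : Nat) (prev s : List Int) : List Int :=
  ((List.range' 1 (m - 1)).foldl
    (fun (st : Int × List Int) j =>
      let best := max st.1 (prev.getD j 0 - s.getD (j - 1) 0)
      (best, st.2 ++ [s.getD j 0 + best]))
    (prev.getD 0 0, [s.getD 0 0 + prev.getD 0 0])).2

-- one iteration of Source B's outer loop; state = (rows, prev)
def pvStepB (m : Nat) (st : List (List Int) × Option (List Int)) (row : List Int) :
    List (List Int) × Option (List Int) :=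
  let s := pvPrefixM row m
  let cur := match st.2 with
    | none => s
    | some p => pvRowB m p s
  (st.1 ++ [cur], some cur)

def cout_Max_alt (sol : List (List Int)) : Int × List (List Int) :=
  let m := (sol.headD []).length
  let rows := (sol.foldl (pvStepB m) ([], none)).1
  ((rows.getLastD []).getLastD 0, rows)

-- ===== PRECONDITION & SPEC =====
-- Pre_ excludes exactly the inputs where Python A raises IndexError: empty sol,
-- an empty first row, or a row shorter than the first row (rows may be longer; extras are ignored).
def Pre_cout_Max (sol : List (List Int)) : Prop :=
  sol ≠ [] ∧ 0 < (sol.headD []).length ∧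
    ∀ row ∈ sol, (sol.headD []).length ≤ row.length
instance (sol : List (List Int)) : Decidable (Pre_cout_Max sol) := by
  unfold Pre_cout_Max; infer_instance
def pvWitness_cout_Max : List (List Int) := [[2, 1], [3, 4]]

def Spec_cout_Max (sol : List (List Int)) (out : Int × List (List Int)) : Prop := out = cout_Max_alt sol
instance (sol : List (List Int)) (out : Int × List (List Int)) : Decidable (Spec_cout_Max sol out) := by unfold Spec_cout_Max; infer_instance

-- ===== CLAIM (what is proved, stated in full; the proofs are below) =====
def Claim_equal_cout_Max : Prop := ∀ (sol : List (List Int)), Dom_cout_Max sol → Pre_cout_Max sol → Spec_cout_Max sol (cout_Max sol)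

-- ===== LEMMAS AND PROOFS =====

-- prefix sums of a row, by index
def pvRefP (xs : List Int) : Nat → Int
  | 0 => xs.getD 0 0
  | k + 1 => xs.getD (k + 1) 0 + pvRefP xs k

-- value recurrence of a later row of the table (A's recurrence)
def pvRef (prev row : List Int) : Nat → Int
  | 0 => prev.getD 0 0 + row.getD 0 0
  | k + 1 => row.getD (k + 1) 0 + max (pvRef prev row k) (prev.getD (k + 1) 0)

-- B's running maximum max_{k≤j}(prev[k] - S[k-1])
def pvM (prev row : List Int) : Nat → Int
  | 0 => prev.getD 0 0
  | k + 1 => max (pvM prev row k) (prev.getD (k + 1) 0 - pvRefP row k)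

-- the canonical table, row by row
def pvTab (sol : List (List Int)) (m : Nat) : Nat → List (List Int)
  | 0 => []
  | 1 => [(List.range m).map (pvRefP (sol.getD 0 []))]
  | i + 2 => pvTab sol m (i + 1) ++
      [(List.range m).map (pvRef ((pvTab sol m (i + 1)).getLastD []) (sol.getD (i + 1) []))]

theorem length_pvTab (sol : List (List Int)) (m : Nat) : ∀ i, (pvTab sol m i).length = i
  | 0 => rfl
  | 1 => rfl
  | i + 2 => by simp [pvTab, length_pvTab sol m (i + 1)]

theorem pvTab_lastD_length (sol : List (List Int)) (m : Nat) :
    ∀ i, 0 < i → ((pvTab sol m i).getLastD []).length = m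
  | 1, _ => by simp [pvTab]
  | i + 2, _ => by simp [pvTab]

theorem getD_append_left' {α : Type} (l r : List α) (i : Nat) {d : α} (h : i < l.length) :
    (l ++ r).getD i d = l.getD i d := by
  simp [List.getD_eq_getElem?_getD, List.getElem?_append_left h]

theorem getD_append_right' {α : Type} (l r : List α) (i : Nat) {d : α} (h : l.length ≤ i) :
    (l ++ r).getD i d = r.getD (i - l.length) d := by
  simp [List.getD_eq_getElem?_getD, List.getElem?_append_right h]

theorem set_append_at {α : Type} (l r : List α) (i : Nat) (v : α) (h : l.length = i) :
    (l ++ r).set i v = l ++ r.set 0 v := by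
  subst h; simp

theorem getD_eq_getLastD {α : Type} (l : List α) (d : α) :
    l.getD (l.length - 1) d = l.getLastD d := by
  simp [List.getD_eq_getElem?_getD, List.getLastD_eq_getLast?, List.getLast?_eq_getElem?]

theorem mapRange_getD (f : Nat → Int) (m j : Nat) (h : j < m) :
    ((List.range m).map f).getD j 0 = f j := by
  rw [List.getD_eq_getElem?_getD, List.getElem?_map, List.getElem?_range h]; rfl

-- ============ A side: the double loop fills pvTab ============

-- the row the inner loop computes at row index i, as a function of the column
def pvG (sol t : List (List Int)) (i : Nat) : Nat → Int :=
  if i = 0 then pvRefP (sol.getD 0 []) else pvRef (t.getD (i - 1) []) (sol.getD i [])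

theorem inner_aux (sol : List (List Int)) (i m : Nat) (t : List (List Int))
    (hi : i < t.length) (hrow : t.getD i [] = List.replicate m 0) :
    ∀ k, k ≤ m → (List.range k).foldl (pvInner sol i) t
      = t.set i ((List.range k).map (pvG sol t i) ++ List.replicate (m - k) 0)
  | 0, _ => by
      simp only [List.range_zero, List.foldl_nil, List.map_nil, Nat.sub_zero, List.nil_append]
      rw [← hrow]
      simp [List.getD_eq_getElem?_getD, List.getElem?_eq_getElem hi]
  | k + 1, hk => by
      have hkm : k < m := by omega
      have hsplit : (List.range (k + 1)).foldl (pvInner sol i) t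
          = pvInner sol i ((List.range k).foldl (pvInner sol i) t) k := by
        rw [List.range_succ, List.foldl_append]; rfl
      rw [hsplit, inner_aux sol i m t hi hrow k (by omega)]
      set g := pvG sol t i with hg
      set Mk := (List.range k).map g ++ List.replicate (m - k) 0 with hMk
      have hlenM : ((List.range k).map g).length = k := by simp
      have hset : (t.set i Mk).getD i [] = Mk := by
        simp [List.getD_eq_getElem?_getD, hi]
      have hsetrow : Mk.set k (g k)
          = (List.range (k + 1)).map g ++ List.replicate (m - (k + 1)) 0 := by
        have hrep : List.replicate (m - k) (0 : Int) = 0 :: List.replicate (m - (k + 1)) 0 := by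
          rw [show m - k = (m - (k + 1)) + 1 by omega, List.replicate_succ]
        rw [hMk, hrep, ← hlenM, List.range_succ, List.map_append]
        simp
      have hvrow : ∀ v, pvSet2 (t.set i Mk) i k v = t.set i (Mk.set k v) := by
        intro v
        rw [pvSet2, hset, List.set_set]
      have hGk1 : 0 < k → Mk.getD (k - 1) 0 = g (k - 1) := by
        intro hk0
        rw [hMk, getD_append_left' _ _ _ (d := 0) (by omega)]
        rw [List.getD_eq_getElem?_getD]
        simp [List.getElem?_range (show k - 1 < k by omega)]
      have hprev : 0 < i → (t.set i Mk).getD (i - 1) [] = t.getD (i - 1) [] := by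
        intro hipos
        simp [List.getD_eq_getElem?_getD, List.getElem?_set_ne (show i ≠ i - 1 by omega)]
      simp only [pvInner, pvGet2, hset]
      rcases Nat.eq_zero_or_pos i with hi0 | hipos
      · subst hi0
        rw [if_neg (by omega : ¬ (0 : Nat) > 0)]
        rcases Nat.eq_zero_or_pos k with hk0 | hkpos
        · subst hk0
          have h00 : Mk.getD 0 0 = 0 := by
            rw [hMk]; simp [show m - 0 = (m - 1) + 1 by omega, List.replicate_succ]
          have hval : (sol.getD 0 []).getD 0 0 + (0 : Int) = g 0 := by
            rw [hg, pvG]; simp [pvRefP]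
          rw [if_neg (by omega : ¬ (0 : Nat) > 0), h00, hval, hvrow, hsetrow]
        · have hval : (sol.getD 0 []).getD k 0 + g (k - 1) = g k := by
            rw [hg, pvG, show k = (k - 1) + 1 by omega]
            simp [pvRefP]
          rw [if_pos hkpos, hGk1 hkpos, hval, hvrow, hsetrow]
      · rw [if_pos hipos]
        rcases Nat.eq_zero_or_pos k with hk0 | hkpos
        · subst hk0
          have hval : (sol.getD i []).getD 0 0 + (t.getD (i - 1) []).getD 0 0 = g 0 := by
            rw [hg, pvG, if_neg (by omega : ¬ i = 0), pvRef]; ring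
          rw [if_neg (by omega : ¬ (0 : Nat) > 0), hprev hipos, hval, hvrow, hsetrow]
        · have hval : (sol.getD i []).getD k 0 +
              max (g (k - 1)) ((t.getD (i - 1) []).getD k 0) = g k := by
            rw [hg, pvG, if_neg (by omega : ¬ i = 0), show k = (k - 1) + 1 by omega]
            simp [pvRef]
          rw [if_pos hkpos, hGk1 hkpos, hprev hipos, hval, hvrow, hsetrow]

theorem inner_lemma (sol : List (List Int)) (i m : Nat) (t : List (List Int))
    (hi : i < t.length) (hrow : t.getD i [] = List.replicate m 0) :
    (List.range m).foldl (pvInner sol i) t = t.set i ((List.range m).map (pvG sol t i)) := by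
  have := inner_aux sol i m t hi hrow m le_rfl
  simpa using this

theorem outer_aux (sol : List (List Int)) (m : Nat) :
    ∀ i, i ≤ sol.length →
      (List.range i).foldl (fun t i => (List.range m).foldl (pvInner sol i) t)
          (List.replicate sol.length (List.replicate m 0))
        = pvTab sol m i ++ List.replicate (sol.length - i) (List.replicate m 0)
  | 0, _ => by simp [pvTab]
  | i + 1, h => by
      have hin : i < sol.length := by omega
      have hsplit : (List.range (i + 1)).foldl
            (fun t i => (List.range m).foldl (pvInner sol i) t)
            (List.replicate sol.length (List.replicate m 0))
          = (List.range m).foldl (pvInner sol i)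
              ((List.range i).foldl (fun t i => (List.range m).foldl (pvInner sol i) t)
                (List.replicate sol.length (List.replicate m 0))) := by
        rw [List.range_succ, List.foldl_append]; rfl
      rw [hsplit, outer_aux sol m i (by omega)]
      set t := pvTab sol m i ++ List.replicate (sol.length - i) (List.replicate m 0) with ht
      have htlen : t.length = sol.length := by
        rw [ht]; simp [length_pvTab]; omega
      have hti : i < t.length := by omega
      have hrowi : t.getD i [] = List.replicate m 0 := by
        rw [ht, getD_append_right' _ _ _ (by simp [length_pvTab])]
        rw [length_pvTab, Nat.sub_self]
        rw [show sol.length - i = (sol.length - i - 1) + 1 by omega, List.replicate_succ]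
        rfl
      rw [inner_lemma sol i m t hti hrowi]
      rcases Nat.eq_zero_or_pos i with hi0 | hipos
      · subst hi0
        have hmap : (List.range m).map (pvG sol t 0)
            = (List.range m).map (pvRefP (sol.getD 0 [])) := by
          exact List.map_congr_left (fun k _ => by rw [pvG]; simp)
        rw [hmap, ht]
        simp only [pvTab, List.nil_append]
        rw [show sol.length - 0 = (sol.length - 1) + 1 by omega, List.replicate_succ]
        rfl
      · obtain ⟨j, rfl⟩ : ∃ j, i = j + 1 := ⟨i - 1, by omega⟩
        have hprevrow : t.getD j [] = (pvTab sol m (j + 1)).getLastD [] := by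
          rw [ht, getD_append_left' _ _ _ (by simp [length_pvTab])]
          have hgl := getD_eq_getLastD (pvTab sol m (j + 1)) ([] : List Int)
          rw [length_pvTab] at hgl
          simpa using hgl
        have hmap : (List.range m).map (pvG sol t (j + 1))
            = (List.range m).map (pvRef ((pvTab sol m (j + 1)).getLastD []) (sol.getD (j + 1) [])) := by
          refine List.map_congr_left (fun k _ => ?_)
          rw [pvG, if_neg (by omega : ¬ j + 1 = 0)]
          simp only [Nat.add_sub_cancel]
          rw [hprevrow]
        rw [hmap, ht]
        rw [set_append_at _ _ _ _ (length_pvTab sol m (j + 1))]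
        rw [show sol.length - (j + 1) = (sol.length - (j + 1 + 1)) + 1 by omega,
          List.replicate_succ, List.set_cons_zero]
        show pvTab sol m (j + 1) ++
            ((List.range m).map (pvRef ((pvTab sol m (j + 1)).getLastD []) (sol.getD (j + 1) []))
              :: List.replicate (sol.length - (j + 1 + 1)) (List.replicate m 0))
          = pvTab sol m (j + 1 + 1) ++ List.replicate (sol.length - (j + 1 + 1)) (List.replicate m 0)
      -- both sides append the same singleton
        simp [pvTab]

-- ============ B side: prefix sums + running max produce the same rows ============

theorem pvPrefixM_aux (row : List Int) : ∀ k : Nat,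
    (List.range k).foldl
        (fun (st : List Int × Int) j => (st.1 ++ [st.2 + row.getD j 0], st.2 + row.getD j 0))
        ([], 0)
      = ((List.range k).map (pvRefP row), if k = 0 then 0 else pvRefP row (k - 1))
  | 0 => rfl
  | k + 1 => by
      rw [List.range_succ, List.foldl_append, pvPrefixM_aux row k]
      simp only [List.foldl_cons, List.foldl_nil, List.map_append, List.map_cons, List.map_nil,
        Prod.mk.injEq]
      rcases Nat.eq_zero_or_pos k with hk0 | hkpos
      · subst hk0; simp [pvRefP]
      · rw [if_neg (by omega), if_neg (by omega), Nat.add_sub_cancel,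
          show k = (k - 1) + 1 by omega]
        constructor
        · congr 2; simp [pvRefP]; ring
        · simp [pvRefP]; ring

theorem pvPrefixM_eq (row : List Int) (m : Nat) :
    pvPrefixM row m = (List.range m).map (pvRefP row) := by
  rw [pvPrefixM, pvPrefixM_aux]

-- the central identity: A's recurrence = prefix sum + running maximum
theorem pvRef_eq (prev row : List Int) :
    ∀ k, pvRef prev row k = pvRefP row k + pvM prev row k
  | 0 => by simp [pvRef, pvRefP, pvM]; ring
  | k + 1 => by
      rw [pvRef, pvRef_eq prev row k, pvRefP, pvM]
      set S := pvRefP row k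
      set M := pvM prev row k
      set P := prev.getD (k + 1) 0
      rcases le_total M (P - S) with h | h
      · rw [max_eq_right h, max_eq_right (by omega : S + M ≤ P)]; ring
      · rw [max_eq_left h, max_eq_left (by omega : P ≤ S + M)]; ring

theorem pvRowB_aux (prev row : List Int) (m : Nat) (hm : 0 < m) :
    ∀ t, t ≤ m - 1 →
      (List.range' 1 t).foldl
        (fun (st : Int × List Int) j =>
          let best := max st.1 (prev.getD j 0 - ((List.range m).map (pvRefP row)).getD (j - 1) 0)
          (best, st.2 ++ [((List.range m).map (pvRefP row)).getD j 0 + best]))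
        (prev.getD 0 0,
          [((List.range m).map (pvRefP row)).getD 0 0 + prev.getD 0 0])
      = (pvM prev row t, (List.range (t + 1)).map (pvRef prev row))
  | 0, _ => by
      simp only [List.range'_zero, List.foldl_nil]
      rw [mapRange_getD _ _ _ hm]
      have := pvRef_eq prev row 0
      simp only [pvM, List.range_succ, List.range_zero, List.map_cons, List.map_nil,
        List.nil_append]
      rw [this]; simp [pvM]
  | t + 1, h => by
      rw [List.range'_concat, List.foldl_append, pvRowB_aux prev row m hm t (by omega)]
      simp only [List.foldl_cons, List.foldl_nil]
      have h1 : ((List.range m).map (pvRefP row)).getD (1 + t - 1) 0 = pvRefP row t := by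
        rw [show 1 + t - 1 = t by omega, mapRange_getD _ _ _ (by omega)]
      have h2 : ((List.range m).map (pvRefP row)).getD (1 + t) 0 = pvRefP row (t + 1) := by
        rw [show 1 + t = t + 1 by omega, mapRange_getD _ _ _ (by omega)]
      have h3 : prev.getD (1 + t) 0 = prev.getD (t + 1) 0 := by rw [Nat.add_comm]
      simp only [one_mul, h1, h2, h3, Prod.mk.injEq]
      refine ⟨?_, ?_⟩
      · rw [pvM]
      · rw [List.range_succ (n := t + 1), List.map_append]
        simp only [List.map_cons, List.map_nil]
        congr 2
        rw [pvRef_eq prev row (t + 1), pvRefP, pvM]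

theorem pvRowB_eq (prev row : List Int) (m : Nat) (hm : 0 < m) :
    pvRowB m prev ((List.range m).map (pvRefP row)) = (List.range m).map (pvRef prev row) := by
  rw [pvRowB, pvRowB_aux prev row m hm (m - 1) le_rfl, show m - 1 + 1 = m by omega]

theorem b_fold_aux (sol : List (List Int)) (m : Nat) (hm : 0 < m) :
    ∀ k, 1 ≤ k → k ≤ sol.length →
      ((sol.take k).foldl (pvStepB m) ([], none))
        = (pvTab sol m k, some ((pvTab sol m k).getLastD []))
  | 1, _, h => by
      have h0 : sol.take 1 = [sol.getD 0 []] := by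
        cases sol with
        | nil => simp at h
        | cons a l => simp [List.getD]
      rw [h0]
      simp only [List.foldl_cons, List.foldl_nil, pvStepB]
      rw [pvPrefixM_eq]
      simp [pvTab]
  | k + 2, _, h => by
      have hk : k + 1 < sol.length := by omega
      have hidx : sol[k + 1]? = some (sol.getD (k + 1) []) := by
        rw [List.getElem?_eq_getElem hk]
        rw [List.getD_eq_getElem?_getD, List.getElem?_eq_getElem hk]; rfl
      rw [List.take_add_one, hidx]
      simp only [Option.toList_some]
      rw [List.foldl_append, b_fold_aux sol m hm (k + 1) (by omega) (by omega)]
      simp only [List.foldl_cons, List.foldl_nil, pvStepB]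
      rw [pvPrefixM_eq, pvRowB_eq _ _ _ hm]
      simp [pvTab]

-- ===== VERDICT (by name: the statement is the Claim_ definition above) =====
theorem cout_Max_spec : Claim_equal_cout_Max := by
  intro sol _hdom hpre
  obtain ⟨hne, hm, _hlen⟩ := hpre
  unfold Spec_cout_Max
  have hnpos : 0 < sol.length := List.length_pos_iff.mpr hne
  have h0 : sol.headD [] = sol.getD 0 [] := by cases sol <;> rfl
  have hinit : (List.range sol.length).map
        (fun _ => (List.range (sol.headD []).length).map (fun _ => (0 : Int)))
      = List.replicate sol.length (List.replicate (sol.headD []).length 0) := by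
    simp [List.map_const']
  have hA := outer_aux sol (sol.headD []).length sol.length le_rfl
  rw [Nat.sub_self] at hA
  simp only [List.replicate_zero, List.append_nil] at hA
  have hB := b_fold_aux sol (sol.headD []).length hm sol.length hnpos le_rfl
  rw [List.take_length] at hB
  simp only [cout_Max, cout_Max_alt]
  rw [hinit, hA, hB]
  set T := pvTab sol (sol.headD []).length sol.length with hT
  have hTlen : T.length = sol.length := length_pvTab ..
  have h1 : T.getD (sol.length - 1) [] = T.getLastD [] := by
    rw [show sol.length - 1 = T.length - 1 by rw [hTlen]]
    exact getD_eq_getLastD _ _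
  have h2 : (T.getLastD []).length = (sol.headD []).length :=
    pvTab_lastD_length sol _ sol.length hnpos
  have h3 : (T.getLastD []).getD ((sol.headD []).length - 1) 0 = (T.getLastD []).getLastD 0 := by
    rw [← h2]
    exact getD_eq_getLastD _ _
  rw [pvGet2, h1, h3]
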